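-- pv_equiv track=rewrite | github.com/suyeon0109/programmers | 최고의_집합.py | solution
-- ===== SOURCE A (Python) =====
-- def solution(n,s):
--     answer = []
--     if n > s:
--         answer = [-1]
--         return answer
--
--     quotient = s//n
--     remainder = s%n
--     answer = [quotient] * n
--     if remainder:
--         for i in range(len(answer)-1, -1, -1):
--             answer[i] += 1
--             remainder -= 1
--             if remainder == 0:
--                 break
--
--     return answer
-- ===== SOURCE B (Python) =====
-- def solution(n, s):
--     if n > s:
--         return [-1]
--     answer = []
--     remaining = s
--     for k in range(n, 0, -1):
--         part = remaining // k
--         answer.append(part)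
--         remaining -= part
--     return answer
-- ===== Notes on version B (the rewrite author's own statement) =====
-- stated objective: alternative
-- what changed: B is a single-pass greedy: for k = n down to 1 it emits part = remaining//k (the floor of the average of what is still to distribute) and subtracts it from a running remainder, instead of A's precomputed s//n,s%n fill of a uniform list followed by a backwards increment-and-break patch loop.
-- outside the precondition, e.g. on solution(0, 5): A raises ZeroDivisionError, B returns []
import Mathlib
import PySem

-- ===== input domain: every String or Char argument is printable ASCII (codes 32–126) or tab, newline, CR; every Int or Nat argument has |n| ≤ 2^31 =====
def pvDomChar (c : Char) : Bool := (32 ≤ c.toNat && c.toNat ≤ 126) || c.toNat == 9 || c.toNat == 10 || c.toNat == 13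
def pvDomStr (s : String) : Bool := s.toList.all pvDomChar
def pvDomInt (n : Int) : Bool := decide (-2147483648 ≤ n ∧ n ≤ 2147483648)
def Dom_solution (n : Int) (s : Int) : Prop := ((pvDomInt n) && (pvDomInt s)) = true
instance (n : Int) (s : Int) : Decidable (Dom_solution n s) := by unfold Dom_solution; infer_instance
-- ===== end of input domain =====

-- B replaces A's precompute-then-patch construction by a single-pass greedy that repeatedly
-- emits remaining//k for k = n..1 and keeps a running remainder; objective: alternative.

-- ===== PORT A =====
-- the for-loop: 'answer[i] += 1; remainder -= 1; if remainder == 0: break' over the index list.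
-- The indices come from range(len(answer)-1, -1, -1), so every i is a valid nonnegative index;
-- the total forms pyGetD/pySetD are exact there (no IndexError can occur).
def solutionLoop (answer : List Int) (remainder : Int) (idxs : List Int) : List Int :=
  match idxs with
  | [] => answer
  | i :: rest =>
      let answer' := PySem.List.pySetD answer i (PySem.List.pyGetD answer i 0 + 1)
      let remainder' := remainder - 1
      if remainder' = 0 then answer' else solutionLoop answer' remainder' rest

def solution (n : Int) (s : Int) : List Int :=
  if n > s then [-1]
  else
    let quotient := PySem.Int.floordiv s n
    let remainder := PySem.Int.mod s n
    let answer := PySem.List.pyRepeat [quotient] n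
    if remainder ≠ 0 then
      solutionLoop answer remainder (PySem.List.pyRange ((answer.length : Int) - 1) (-1) (-1))
    else answer

-- ===== PORT B =====
-- 'for k in range(n, 0, -1): part = remaining // k; answer.append(part); remaining -= part'
-- as a fold over the countdown range with state (answer, remaining); k ≥ 1 throughout, so
-- floordiv never divides by zero.
def solution_alt (n : Int) (s : Int) : List Int :=
  if n > s then [-1]
  else
    ((PySem.List.pyRange n 0 (-1)).foldl
      (fun (st : List Int × Int) k =>
        (st.1 ++ [PySem.Int.floordiv st.2 k], st.2 - PySem.Int.floordiv st.2 k))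
      ([], s)).1

-- ===== PRECONDITION & SPEC =====
-- Pre_ excludes exactly n = 0 with 0 ≤ s: there Python A raises ZeroDivisionError on s // n.
def Pre_solution (n : Int) (s : Int) : Prop := ¬ (n = 0 ∧ 0 ≤ s)
instance (n : Int) (s : Int) : Decidable (Pre_solution n s) := by unfold Pre_solution; infer_instance
def pvWitness_solution : Int × Int := (3, 11)

def Spec_solution (n : Int) (s : Int) (out : List Int) : Prop := out = solution_alt n s
instance (n : Int) (s : Int) (out : List Int) : Decidable (Spec_solution n s out) := by unfold Spec_solution; infer_instance

-- ===== CLAIM (what is proved, stated in full; the proofs are below) =====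
def Claim_equal_solution : Prop := ∀ (n : Int) (s : Int), Dom_solution n s → Pre_solution n s → Spec_solution n s (solution n s)

-- ===== LEMMAS AND PROOFS =====

-- the common balanced target both programs compute for 0 < n
def bal (q r : Int) (m : Nat) : List Int :=
  List.replicate (m - r.toNat) q ++ List.replicate r.toNat (q + 1)

-- division facts: for 0 < b the pair (floordiv, mod) is determined by the Euclidean identity
theorem fdivmod_unique (a b q r : Int) (hb : 0 < b) (heq : a = q * b + r)
    (h0 : 0 ≤ r) (hr : r < b) :
    PySem.Int.floordiv a b = q ∧ PySem.Int.mod a b = r := by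
  have hfd : PySem.Int.floordiv a b = Int.fdiv a b := rfl
  have hfm : PySem.Int.mod a b = Int.fmod a b := rfl
  have h := (Int.ediv_emod_unique (a := a) (b := b) (r := r) (q := q) hb).mpr
    ⟨by linarith, h0, hr⟩
  rw [hfd, hfm, Int.fdiv_eq_ediv, Int.fmod_eq_emod, if_pos (Or.inl (le_of_lt hb)),
    if_pos (Or.inl (le_of_lt hb))]
  obtain ⟨h1, h2⟩ := h
  constructor <;> omega

-- bounds of Python's % for a positive divisor
theorem pymod_bounds_pos (a b : Int) (h : 0 < b) :
    0 ≤ PySem.Int.mod a b ∧ PySem.Int.mod a b < b := by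
  have hmod : PySem.Int.mod a b = Int.fmod a b := rfl
  have h1 : 0 ≤ a % b := Int.emod_nonneg a (by omega)
  have h2 : a % b < b := Int.emod_lt_of_pos a h
  rw [hmod, Int.fmod_eq_emod, if_pos (Or.inl (le_of_lt h))]
  omega

-- and for a negative divisor
theorem pymod_bounds_neg (a b : Int) (h : b < 0) :
    PySem.Int.mod a b ≤ 0 ∧ b < PySem.Int.mod a b := by
  have hmod : PySem.Int.mod a b = Int.fmod a b := rfl
  have h1 : 0 ≤ a % b := Int.emod_nonneg a (by omega)
  have h2 : a % b < -b := by
    have := Int.emod_lt_of_pos a (b := -b) (by omega)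
    simpa [Int.emod_neg] using this
  rw [hmod, Int.fmod_eq_emod]
  by_cases hd : 0 ≤ b ∨ b ∣ a
  · rcases hd with hb | hdvd
    · omega
    · have : a % b = 0 := Int.emod_eq_zero_of_dvd hdvd
      rw [if_pos (Or.inr hdvd)]
      omega
  · rw [if_neg hd]
    have hne : a % b ≠ 0 := fun hz => hd (Or.inr (Int.dvd_of_emod_eq_zero hz))
    omega

-- ===== A-side lemmas =====

theorem set_replicate_append_last : ∀ (m : Nat), 1 ≤ m → ∀ (q v : Int) (t : List Int),
    (List.replicate m q ++ t).set (m - 1) v = List.replicate (m - 1) q ++ v :: t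
  | 0, h => by omega
  | 1, _ => by intro q v t; simp
  | (j + 2), _ => by
      intro q v t
      have ih := set_replicate_append_last (j + 1) (by omega) q v t
      simp only [Nat.add_sub_cancel] at ih
      rw [List.replicate_succ (n := j + 1), List.cons_append]
      show (q :: (List.replicate (j + 1) q ++ t)).set (j + 1) v
          = List.replicate (j + 1) q ++ v :: t
      rw [List.set_cons_succ, ih]
      simp [List.replicate_succ]

theorem getD_replicate_append_last (m : Nat) (hm : 1 ≤ m) (q : Int) (t : List Int) :
    (List.replicate m q ++ t).getD (m - 1) 0 = q := by
  have h : m - 1 < (List.replicate m q).length := by rw [List.length_replicate]; omega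
  rw [List.getD_eq_getElem?_getD, List.getElem?_append_left h, List.getElem?_replicate,
    if_pos (show m - 1 < m by omega)]
  rfl

-- the patch loop on a uniform block: incrementing the last k cells back-to-front
theorem solutionLoop_replicate (k : Nat) : ∀ (m : Nat) (q : Int) (t : List Int),
    1 ≤ k → k ≤ m →
    solutionLoop (List.replicate m q ++ t) (k : Int) (PySem.List.pyRange ((m : Int) - 1) (-1) (-1))
      = List.replicate (m - k) q ++ List.replicate k (q + 1) ++ t := by
  induction k with
  | zero => intro m q t hk1 _; omega
  | succ j ih =>
    intro m q t _ hkm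
    have hm1 : 1 ≤ m := by omega
    rw [PySem.List.pyRange_neg_one_cons (show (-1 : Int) < (m : Int) - 1 by omega)]
    simp only [solutionLoop]
    have hnn : (0 : Int) ≤ (m : Int) - 1 := by omega
    rw [PySem.List.pySetD_of_nonneg _ _ hnn, PySem.List.pyGetD_of_nonneg _ _ hnn]
    have htn : ((m : Int) - 1).toNat = m - 1 := by omega
    rw [htn, getD_replicate_append_last m hm1 q t, set_replicate_append_last m hm1 _ _ t]
    by_cases hj : j = 0
    · subst hj
      rw [if_pos (by norm_num)]
      simp [List.replicate_succ]
    · rw [if_neg (show ¬ (((j + 1 : Nat) : Int) - 1 = 0) by push_cast; omega)]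
      have harith : ((j + 1 : Nat) : Int) - 1 = ((j : Nat) : Int) := by push_cast; ring
      have harith2 : ((m : Int) - 1 - 1) = (((m - 1 : Nat) : Nat) : Int) - 1 := by omega
      rw [harith, harith2, ih (m - 1) q ((q + 1) :: t) (by omega) (by omega)]
      have hstep : List.replicate j (q + 1) ++ (q + 1) :: t
          = List.replicate (j + 1) (q + 1) ++ t := by
        rw [List.replicate_succ' (n := j)]
        simp
      rw [List.append_assoc, hstep, ← List.append_assoc]
      have hmm : m - 1 - j = m - (j + 1) := by omega
      rw [hmm]

-- A computes the balanced split for positive n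
theorem solution_eq_bal (n s : Int) (hn : 0 < n) (hns : ¬ n > s) :
    solution n s = bal (PySem.Int.floordiv s n) (PySem.Int.mod s n) n.toNat := by
  obtain ⟨hr0, hrn⟩ := pymod_bounds_pos s n hn
  unfold solution bal
  rw [if_neg hns]
  show (if PySem.Int.mod s n ≠ 0 then
          solutionLoop (PySem.List.pyRepeat [PySem.Int.floordiv s n] n) (PySem.Int.mod s n)
            (PySem.List.pyRange (((PySem.List.pyRepeat [PySem.Int.floordiv s n] n).length : Int) - 1) (-1) (-1))
        else PySem.List.pyRepeat [PySem.Int.floordiv s n] n)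
      = List.replicate (n.toNat - (PySem.Int.mod s n).toNat) (PySem.Int.floordiv s n)
          ++ List.replicate (PySem.Int.mod s n).toNat (PySem.Int.floordiv s n + 1)
  by_cases hrz : PySem.Int.mod s n = 0
  · rw [if_neg (by simp [hrz])]
    simp [hrz, PySem.List.pyRepeat_singleton]
  · rw [if_pos hrz]
    rw [PySem.List.pyRepeat_singleton]
    simp only [List.length_replicate]
    have hk : PySem.Int.mod s n = (((PySem.Int.mod s n).toNat : Nat) : Int) := by omega
    have main := solutionLoop_replicate (PySem.Int.mod s n).toNat n.toNat
      (PySem.Int.floordiv s n) [] (by omega) (by omega)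
    simp only [List.append_nil] at main
    rw [hk, main, Int.toNat_natCast]

-- ===== B-side lemmas =====

-- the pure recursion underlying B's fold (the appended parts, without the accumulator)
def goB : List Int → Int → List Int
  | [], _ => []
  | k :: ks, rem => PySem.Int.floordiv rem k :: goB ks (rem - PySem.Int.floordiv rem k)

theorem foldl_goB : ∀ (l : List Int) (acc : List Int) (rem : Int),
    (l.foldl
      (fun (st : List Int × Int) k =>
        (st.1 ++ [PySem.Int.floordiv st.2 k], st.2 - PySem.Int.floordiv st.2 k))
      (acc, rem)).1 = acc ++ goB l rem
  | [], acc, rem => by simp [goB]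
  | k :: ks, acc, rem => by
      simp only [List.foldl_cons, goB]
      rw [foldl_goB ks _ _]
      simp

-- the greedy over the countdown range produces the balanced split
theorem goB_pyRange (m : Nat) : ∀ (rem : Int), 1 ≤ m →
    goB (PySem.List.pyRange (m : Int) 0 (-1)) rem
      = bal (PySem.Int.floordiv rem m) (PySem.Int.mod rem m) m := by
  induction m with
  | zero => intro rem h; omega
  | succ j ih =>
    intro rem _
    have hm : (0 : Int) < ((j + 1 : Nat) : Int) := by push_cast; omega
    obtain ⟨hr0, hrm⟩ := pymod_bounds_pos rem ((j + 1 : Nat) : Int)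
      (by exact_mod_cast hm)
    set q := PySem.Int.floordiv rem ((j + 1 : Nat) : Int) with hq
    set r := PySem.Int.mod rem ((j + 1 : Nat) : Int) with hr
    have hid : rem = q * ((j + 1 : Nat) : Int) + r := by
      have : PySem.Int.floordiv rem ((j + 1 : Nat) : Int) = Int.fdiv rem ((j + 1 : Nat) : Int) := rfl
      have h2 : PySem.Int.mod rem ((j + 1 : Nat) : Int) = Int.fmod rem ((j + 1 : Nat) : Int) := rfl
      rw [hq, hr, this, h2, Int.mul_comm]
      exact (Int.fdiv_add_fmod rem _).symm
    rw [PySem.List.pyRange_neg_one_cons (show (0 : Int) < ((j + 1 : Nat) : Int) from hm)]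
    simp only [goB]
    by_cases hj : j = 0
    · subst hj
      have hrz : r = 0 := by
        have : r < 1 := by exact_mod_cast hrm
        omega
      rw [PySem.List.pyRange_neg_one_eq_nil (by norm_num)]
      push_cast [hrz] at hid
      simp [goB, bal, hrz]
      omega
    · have hj1 : (1 : Nat) ≤ j := by omega
      have hcast : ((j + 1 : Nat) : Int) - 1 = ((j : Nat) : Int) := by push_cast; ring
      rw [hcast]
      by_cases hrk : r = ((j : Nat) : Int)
      · -- remainder fills every later slot: rem - q = (q+1)*j
        have hdm := fdivmod_unique (rem - q) ((j : Nat) : Int) (q + 1) 0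
          (by exact_mod_cast hj1) (by rw [hid, hrk]; push_cast; ring) (le_refl 0)
          (by exact_mod_cast hj1)
        rw [ih (rem - q) hj1, hdm.1, hdm.2]
        unfold bal
        have h1 : r.toNat = j := by omega
        rw [h1]
        have h2 : j + 1 - j = 1 := by omega
        rw [h2]
        simp only [Int.toNat_zero, List.replicate_zero, List.append_nil, Nat.sub_zero,
          List.replicate_one, List.singleton_append]
        rw [← hq]
      · -- remainder unchanged: rem - q = q*j + r with r < j
        have hrj : r < ((j : Nat) : Int) := by
          have : r < ((j + 1 : Nat) : Int) := hrm
          push_cast at this ⊢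
          omega
        have hdm := fdivmod_unique (rem - q) ((j : Nat) : Int) q r
          (by exact_mod_cast hj1) (by rw [hid]; push_cast; ring) hr0 hrj
        rw [ih (rem - q) hj1, hdm.1, hdm.2]
        unfold bal
        have h1 : j + 1 - r.toNat = (j - r.toNat) + 1 := by omega
        rw [h1, List.replicate_succ, List.cons_append]

-- B computes the balanced split for positive n
theorem solution_alt_eq_bal (n s : Int) (hn : 0 < n) (hns : ¬ n > s) :
    solution_alt n s = bal (PySem.Int.floordiv s n) (PySem.Int.mod s n) n.toNat := by
  unfold solution_alt
  rw [if_neg hns, foldl_goB, List.nil_append]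
  have hcast : ((n.toNat : Nat) : Int) = n := by omega
  rw [show n = ((n.toNat : Nat) : Int) from hcast.symm]
  rw [goB_pyRange n.toNat s (by omega), Int.toNat_natCast]

theorem solution_eq_all (n s : Int) (hpre : ¬ (n = 0 ∧ 0 ≤ s)) :
    solution n s = solution_alt n s := by
  by_cases hns : n > s
  · unfold solution solution_alt
    rw [if_pos hns, if_pos hns]
  · rcases lt_trichotomy n 0 with hneg | hz | hpos
    · -- n < 0 and n ≤ s: both sides are []
      obtain ⟨hrle, hrgt⟩ := pymod_bounds_neg s n hneg
      have hA : solution n s = [] := by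
        unfold solution
        rw [if_neg hns]
        show (if PySem.Int.mod s n ≠ 0 then
                solutionLoop (PySem.List.pyRepeat [PySem.Int.floordiv s n] n) (PySem.Int.mod s n)
                  (PySem.List.pyRange (((PySem.List.pyRepeat [PySem.Int.floordiv s n] n).length : Int) - 1) (-1) (-1))
              else PySem.List.pyRepeat [PySem.Int.floordiv s n] n)
            = []
        have hrep : PySem.List.pyRepeat [PySem.Int.floordiv s n] n = ([] : List Int) := by
          rw [PySem.List.pyRepeat_singleton]
          have : n.toNat = 0 := by omega
          simp [this]
        rw [hrep]
        by_cases hrz : PySem.Int.mod s n = 0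
        · rw [if_neg (by simp [hrz])]
        · rw [if_pos hrz]
          rw [PySem.List.pyRange_neg_one_eq_nil (by simp)]
          rfl
      have hB : solution_alt n s = [] := by
        unfold solution_alt
        rw [if_neg hns, PySem.List.pyRange_neg_one_eq_nil (by omega)]
        rfl
      rw [hA, hB]
    · exact absurd ⟨hz, by omega⟩ hpre
    · rw [solution_eq_bal n s hpos hns, solution_alt_eq_bal n s hpos hns]

-- ===== VERDICT (by name: the statement is the Claim_ definition above) =====
theorem solution_spec : Claim_equal_solution := by
  intro n s _ hpre
  unfold Spec_solution
  exact solution_eq_all n s hpre
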